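-- pv_equiv track=rewrite | github.com/musketsgithub/pokergpt | utils/poker_parser.py | parse_hand_history
-- ===== SOURCE A (Python) =====
-- def parse_hand_history(hand_history):
--     rounds = []
--     current_round = []
--
--     # Define round headers to detect different rounds
--     round_headers = ["PREFLOP", "FLOP", "TURN", "RIVER"]
--
--     # Iterate through each line of the hand history
--     for line in hand_history.strip().split("\n"):
--         # Check if the line contains a round header
--         if any(round_header in line for round_header in round_headers):
--             # If we have accumulated any action in the current round, store it
--             if current_round:
--                 rounds.append(current_round)
--             # Start a new round with the current line
--             current_round = [line]
--         else:
--             # Otherwise, continue accumulating lines for the current round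
--             current_round.append(line)
--
--     # Don't forget to add the last round
--     if current_round:
--         rounds.append(current_round)
--
--     return rounds
-- ===== SOURCE B (Python) =====
-- def parse_hand_history(hand_history):
--     headers = ("PREFLOP", "FLOP", "TURN", "RIVER")
--     lines = hand_history.strip().split("\n")
--     # index table of header lines, then build the rounds by slicing
--     idx = [i for i, line in enumerate(lines) if any(h in line for h in headers)]
--     if not idx:
--         return [lines]
--     rounds = [lines[:idx[0]]] if idx[0] > 0 else []
--     bounds = idx + [len(lines)]
--     for b, e in zip(bounds, bounds[1:]):
--         rounds.append(lines[b:e])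
--     return rounds
-- ===== Notes on version B (the rewrite author's own statement) =====
-- stated objective: alternative
-- what changed: Replaces A's accumulate-and-flush buffer loop with an index-then-slice strategy: one pass collects the indices of header lines, then the rounds are produced by slicing between consecutive boundary indices.
import Mathlib
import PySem

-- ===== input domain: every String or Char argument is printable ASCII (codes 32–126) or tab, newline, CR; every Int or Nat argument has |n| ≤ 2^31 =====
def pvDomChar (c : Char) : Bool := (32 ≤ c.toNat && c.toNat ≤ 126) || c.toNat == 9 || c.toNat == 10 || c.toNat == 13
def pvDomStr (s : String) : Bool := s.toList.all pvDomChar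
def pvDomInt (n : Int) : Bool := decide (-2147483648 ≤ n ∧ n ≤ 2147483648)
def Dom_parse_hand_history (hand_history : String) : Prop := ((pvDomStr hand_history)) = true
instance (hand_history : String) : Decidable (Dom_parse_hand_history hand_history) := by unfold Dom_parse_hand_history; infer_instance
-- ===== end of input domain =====

-- B replaces A's accumulate-and-flush buffer loop with an index-then-slice strategy (same cost, different decomposition).


-- ===== PORT A =====
-- literal transliteration of A: fold over the lines with state (rounds, current_round), final flush
def parse_hand_history (hand_history : String) : List (List String) :=
  let round_headers : List String := ["PREFLOP", "FLOP", "TURN", "RIVER"]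
  -- .split("\n"): sep is non-empty, so Str.split? is always `some`
  let lines := (PySem.Str.split? (PySem.Str.strip hand_history) "\n").getD []
  let st := lines.foldl
    (fun (st : List (List String) × List String) line =>
      if round_headers.any (fun h => PySem.Str.isIn h line) then
        (if st.2 ≠ [] then st.1 ++ [st.2] else st.1, [line])
      else
        (st.1, st.2 ++ [line]))
    ([], [])
  if st.2 ≠ [] then st.1 ++ [st.2] else st.1

-- ===== PORT B =====
-- literal transliteration of B: boundary-index table, then rounds by slicing between consecutive bounds
def parse_hand_history_alt (hand_history : String) : List (List String) :=
  let headers : List String := ["PREFLOP", "FLOP", "TURN", "RIVER"]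
  let lines := (PySem.Str.split? (PySem.Str.strip hand_history) "\n").getD []
  let idx := (PySem.List.enumerate lines).filterMap
    (fun p => if headers.any (fun h => PySem.Str.isIn h p.2) then some p.1 else none)
  match idx with
  | [] => [lines]
  | i0 :: _ =>
    let rounds := if 0 < i0 then [PySem.List.slice lines none (some i0)] else []
    let bounds := idx ++ [(lines.length : Int)]
    (bounds.zip bounds.tail).foldl
      (fun acc p => acc ++ [PySem.List.slice lines (some p.1) (some p.2)]) rounds

-- ===== PRECONDITION & SPEC =====
def Spec_parse_hand_history (hand_history : String) (out : List (List String)) : Prop := out = parse_hand_history_alt hand_history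
instance (hand_history : String) (out : List (List String)) : Decidable (Spec_parse_hand_history hand_history out) := by unfold Spec_parse_hand_history; infer_instance

-- ===== CLAIM (what is proved, stated in full; the proofs are below) =====
def Claim_equal_parse_hand_history : Prop := ∀ (hand_history : String), Dom_parse_hand_history hand_history → Spec_parse_hand_history hand_history (parse_hand_history hand_history)

-- ===== LEMMAS AND PROOFS =====

-- the shared header test
def pvIsHdr (line : String) : Bool :=
  (["PREFLOP", "FLOP", "TURN", "RIVER"] : List String).any (fun h => PySem.Str.isIn h line)

def pvFlush (cur : List String) : List (List String) := if cur ≠ [] then [cur] else []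

-- direct recursive description of A's loop
def pvG (cur : List String) : List String → List (List String)
  | [] => pvFlush cur
  | l :: rest => if pvIsHdr l then pvFlush cur ++ pvG [l] rest else pvG (cur ++ [l]) rest

-- header positions (Nat)
def pvIdx : List String → List Nat
  | [] => []
  | l :: rest => if pvIsHdr l then 0 :: (pvIdx rest).map (· + 1) else (pvIdx rest).map (· + 1)

-- chunks of lines between consecutive boundary indices (Nat form)
def pvChunks (lines : List String) : List Nat → List (List String)
  | [] => []
  | [_] => []
  | a :: b :: rest => (lines.drop a).take (b - a) :: pvChunks lines (b :: rest)

-- the slices B's zip-fold builds (Int bounds form)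
def pvPairs (lines : List String) : List Int → List (List String)
  | [] => []
  | [_] => []
  | a :: b :: rest => PySem.List.slice lines (some a) (some b) :: pvPairs lines (b :: rest)

lemma pv_go_ne_nil (sep : List Char) : ∀ (fuel : Nat) (l cur : List Char) (acc : List (List Char)),
    PySem.Chars.splitOn.go sep fuel l cur acc ≠ [] := by
  intro fuel
  induction fuel with
  | zero => intro l cur acc; simp [PySem.Chars.splitOn.go]
  | succ n ih =>
    intro l cur acc
    cases l with
    | nil => simp [PySem.Chars.splitOn.go]
    | cons c rest =>
      rw [PySem.Chars.splitOn.go]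
      split
      · exact ih _ _ _
      · exact ih _ _ _

lemma pv_lines_ne_nil (s : String) :
    (PySem.Str.split? s "\n").getD [] ≠ [] := by
  have h : ("\n".toList : List Char) ≠ [] := by decide
  simp [PySem.Str.split?, PySem.Chars.split?, h]
  exact pv_go_ne_nil _ _ _ _ _

-- A's fold with final flush equals pvG
lemma pv_A_eq_pvG : ∀ (ls : List String) (rounds : List (List String)) (cur : List String),
    (let st := ls.foldl
        (fun (st : List (List String) × List String) line =>
          if pvIsHdr line then
            (if st.2 ≠ [] then st.1 ++ [st.2] else st.1, [line])
          else
            (st.1, st.2 ++ [line]))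
        (rounds, cur)
     if st.2 ≠ [] then st.1 ++ [st.2] else st.1) = rounds ++ pvG cur ls := by
  intro ls
  induction ls with
  | nil =>
    intro rounds cur
    simp only [List.foldl_nil, pvG, pvFlush]
    split <;> simp
  | cons l rest ih =>
    intro rounds cur
    simp only [List.foldl_cons, pvG]
    by_cases h : pvIsHdr l
    · simp only [h, if_pos, ih]
      by_cases hc : cur = [] <;> simp [pvFlush, hc]
    · simp only [h, ih]
      simp [pvFlush, h]

-- B's boundary-index comprehension equals pvIdx (shifted by the enumerate start)
lemma pv_idx_eq : ∀ (ls : List String) (s : Int),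
    (PySem.List.enumerate ls s).filterMap
      (fun p => if pvIsHdr p.2 then some p.1 else none)
      = (pvIdx ls).map (fun (k : Nat) => s + (k : Int)) := by
  intro ls
  induction ls with
  | nil => intro s; simp [PySem.List.enumerate_nil, pvIdx]
  | cons l rest ih =>
    intro s
    rw [PySem.List.enumerate_cons]
    by_cases h : pvIsHdr l
    · simp only [List.filterMap_cons, h, if_pos, pvIdx, ih (s + 1), List.map_cons, List.map_map]
      congr 1
      · simp
      · apply List.map_congr_left
        intro k _
        simp only [Function.comp_apply]
        push_cast
        ring
    · simp only [List.filterMap_cons, h, pvIdx, ih (s + 1), List.map_map,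
        Bool.false_eq_true, if_false]
      apply List.map_congr_left
      intro k _
      simp only [Function.comp_apply]
      push_cast
      ring

-- B's zip-fold equals pvPairs
lemma pv_zipfold_eq (lines : List String) : ∀ (bs : List Int) (rounds : List (List String)),
    (bs.zip bs.tail).foldl
        (fun acc p => acc ++ [PySem.List.slice lines (some p.1) (some p.2)]) rounds
      = rounds ++ pvPairs lines bs := by
  intro bs
  induction bs with
  | nil => intro rounds; simp [pvPairs]
  | cons a t ih =>
    intro rounds
    cases t with
    | nil => simp [pvPairs]
    | cons b rest =>
      simp only [List.tail_cons, List.zip_cons_cons, List.foldl_cons, pvPairs]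
      have ih' := ih (rounds ++ [PySem.List.slice lines (some a) (some b)])
      simp only [List.tail_cons] at ih'
      rw [ih']
      simp

-- pvPairs on cast indices equals pvChunks
lemma pv_pairs_eq_chunks (lines : List String) : ∀ (bs : List Nat),
    pvPairs lines (bs.map (fun (k : Nat) => (k : Int))) = pvChunks lines bs := by
  intro bs
  induction bs with
  | nil => simp [pvPairs, pvChunks]
  | cons a t ih =>
    cases t with
    | nil => simp [pvPairs, pvChunks]
    | cons b rest =>
      simp only [List.map_cons, pvPairs, pvChunks]
      rw [PySem.List.slice_natCast]
      simp only [List.map_cons] at ih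
      rw [ih]

-- chunking ignores a common +1 shift against a cons
lemma pv_chunks_shift (l : String) (rest : List String) : ∀ (bs : List Nat),
    pvChunks (l :: rest) (bs.map (· + 1)) = pvChunks rest bs := by
  intro bs
  induction bs with
  | nil => simp [pvChunks]
  | cons a t ih =>
    cases t with
    | nil => simp [pvChunks]
    | cons b rest' =>
      simp only [List.map_cons, pvChunks, List.drop_succ_cons, Nat.succ_sub_succ]
      simp only [List.map_cons] at ih
      rw [ih]

-- the heart: pvG as prefix + boundary chunks
lemma pv_main : ∀ (ls cur : List String),
    pvG cur ls = match pvIdx ls with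
      | [] => if cur ++ ls ≠ [] then [cur ++ ls] else []
      | i :: is =>
          (if cur ++ ls.take i ≠ [] then [cur ++ ls.take i] else [])
            ++ pvChunks ls (i :: is ++ [ls.length]) := by
  intro ls
  induction ls with
  | nil =>
    intro cur
    simp [pvG, pvIdx, pvFlush]
  | cons l rest ih =>
    intro cur
    by_cases h : pvIsHdr l
    · simp only [pvG, h, if_pos, pvIdx]
      have hrec : pvG [l] rest
          = pvChunks (l :: rest) (0 :: ((pvIdx rest).map (· + 1) ++ [(l :: rest).length])) := by
        rw [ih [l]]
        cases hr : pvIdx rest with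
        | nil =>
          simp [pvChunks, List.length_cons, List.take_length]
        | cons j js =>
          have hsh := pv_chunks_shift l rest (j :: (js ++ [rest.length]))
          simp only [List.map_cons, List.map_append, List.map_nil] at hsh
          simp only [List.map_cons, List.length_cons, pvChunks, List.drop_zero, Nat.sub_zero,
            List.take_succ_cons, List.cons_append]
          rw [← List.cons_append, hsh]
          simp [pvChunks]
      rw [hrec]
      simp only [List.take_zero, List.append_nil, pvFlush, List.length_cons, List.cons_append]
    · simp only [pvG, h, pvIdx, Bool.false_eq_true, if_false]
      rw [ih (cur ++ [l])]
      cases hr : pvIdx rest with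
      | nil => simp
      | cons j js =>
        have hsh := pv_chunks_shift l rest (j :: (js ++ [rest.length]))
        simp only [List.map_cons, List.map_append, List.map_nil] at hsh
        simp only [List.map_cons, List.length_cons, List.take_succ_cons, List.cons_append]
        rw [← List.cons_append, hsh]
        have hl : cur ++ l :: rest.take j = (cur ++ [l]) ++ rest.take j := by simp
        rw [hl]
        simp [List.cons_append]

-- B's port equals pvG [] lines (lines non-empty)
lemma pv_B_eq_pvG (hand_history : String) :
    parse_hand_history_alt hand_history
      = pvG [] ((PySem.Str.split? (PySem.Str.strip hand_history) "\n").getD []) := by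
  unfold parse_hand_history_alt
  set lines := (PySem.Str.split? (PySem.Str.strip hand_history) "\n").getD [] with hl
  have hne : lines ≠ [] := pv_lines_ne_nil _
  clear_value lines
  have hidx : (PySem.List.enumerate lines).filterMap
      (fun p => if (["PREFLOP", "FLOP", "TURN", "RIVER"] : List String).any
          (fun h => PySem.Str.isIn h p.2) then some p.1 else none)
      = (pvIdx lines).map (fun (k : Nat) => (k : Int)) := by
    have := pv_idx_eq lines 0
    simpa [pvIsHdr] using this
  rw [pv_main lines []]
  simp only [hidx]
  cases hp : pvIdx lines with
  | nil => simp [hne]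
  | cons i is =>
    simp only [List.map_cons, List.cons_append]
    rw [pv_zipfold_eq]
    have hpair : pvPairs lines ((i : Int) :: ((is.map (fun (k : Nat) => (k : Int))) ++ [(lines.length : Int)]))
        = pvChunks lines (i :: is ++ [lines.length]) := by
      have := pv_pairs_eq_chunks lines (i :: is ++ [lines.length])
      simp only [List.map_cons, List.map_append, List.map_nil] at this
      exact this
    rw [hpair]
    have hpre : (if 0 < (i : Int) then [PySem.List.slice lines none (some (i : Int))] else [])
        = (if [] ++ lines.take i ≠ [] then [[] ++ lines.take i] else []) := by
      rw [PySem.List.slice_to_natCast]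
      by_cases hi : 0 < i
      · have ht : lines.take i ≠ [] := by
          simp only [ne_eq, List.take_eq_nil_iff, not_or]
          exact ⟨by omega, hne⟩
        simp [hi, ht]
      · have hi0 : i = 0 := by omega
        simp [hi0]
    rw [hpre]
    simp [List.cons_append]

-- ===== VERDICT (by name: the statement is the Claim_ definition above) =====
theorem parse_hand_history_spec : Claim_equal_parse_hand_history := by
  intro hand_history _
  unfold Spec_parse_hand_history
  rw [pv_B_eq_pvG]
  unfold parse_hand_history
  have := pv_A_eq_pvG ((PySem.Str.split? (PySem.Str.strip hand_history) "\n").getD []) [] []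
  simpa [pvIsHdr] using this
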